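-- pv_equiv track=rewrite | github.com/sousagabriel47/parsing_tab | parsing.py | gera_nome
-- ===== SOURCE A (Python) =====
-- def gera_nome(tab_str):
--     """Gera o nome do arquivo."""
--     count = 0
--     seq = []
--     for ch in range(len(tab_str)-1):
--         if tab_str[ch] == ' ' and tab_str[ch+1] == ' ':
--             if count:
--                 seq.append(count)
--                 count = 0
--         elif tab_str[ch] == ' ':
--             count += 1
--     if count:
--         seq.append(count)
--     return '_'.join([str(s) for s in seq])
-- ===== SOURCE B (Python) =====
-- def gera_nome(tab_str):
--     """Gera o nome do arquivo (run-based rewrite)."""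
--     seq = []
--     count = 0
--     i, n = 0, len(tab_str)
--     while i < n:
--         j = i + 1
--         while j < n and tab_str[j] == tab_str[i]:
--             j += 1
--         if tab_str[i] == ' ':
--             length = j - i
--             at_end = (j == n)
--             if length >= 2:
--                 if count:
--                     seq.append(count)
--                 count = 0 if at_end else 1
--             elif not at_end:
--                 count += 1
--         i = j
--     if count:
--         seq.append(count)
--     return '_'.join(map(str, seq))
-- ===== Notes on version B (the rewrite author's own statement) =====
-- stated objective: alternative
-- what changed: B decomposes the string into maximal character runs (manual groupby) and handles each space-run once by its length and an end-of-string flag, instead of A's per-index scan over adjacent character pairs.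
import Mathlib
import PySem

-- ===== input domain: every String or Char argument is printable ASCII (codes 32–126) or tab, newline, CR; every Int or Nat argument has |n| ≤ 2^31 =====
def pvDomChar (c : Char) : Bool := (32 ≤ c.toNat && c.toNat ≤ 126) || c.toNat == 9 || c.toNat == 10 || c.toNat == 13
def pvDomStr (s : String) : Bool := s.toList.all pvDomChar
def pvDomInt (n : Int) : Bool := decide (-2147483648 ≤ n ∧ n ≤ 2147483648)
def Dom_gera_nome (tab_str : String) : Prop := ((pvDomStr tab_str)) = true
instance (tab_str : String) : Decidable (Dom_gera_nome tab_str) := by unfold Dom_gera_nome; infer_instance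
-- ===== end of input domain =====

-- B re-decomposes the scan into maximal character runs (alternative decomposition, same cost).

-- ===== PORT A =====
-- A: one loop over indices 0..len-2, looking at the character and its successor.
def gera_nome (tab_str : String) : String :=
  let cs := tab_str.toList
  let st := (List.range (cs.length - 1)).foldl
    (fun (st : Int × List Int) ch =>
      if cs.getD ch ' ' = ' ' ∧ cs.getD (ch + 1) ' ' = ' ' then
        if st.1 ≠ 0 then (0, st.2 ++ [st.1]) else st
      else if cs.getD ch ' ' = ' ' then (st.1 + 1, st.2)
      else st) ((0 : Int), ([] : List Int))
  let seq := if st.1 ≠ 0 then st.2 ++ [st.1] else st.2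
  PySem.Str.join "_" (seq.map PySem.Int.toStr)

-- ===== PORT B =====
-- B's outer while-loop: strip one maximal run at a time (inner scan = takeWhile/dropWhile).
def gera_nome_altLoop : List Char → Int × List Int → Int × List Int
  | [], st => st
  | c :: rest, st =>
      let run := rest.takeWhile (· == c)
      let rest' := rest.dropWhile (· == c)
      let st' :=
        if c = ' ' then
          let length := run.length + 1
          let atEnd := rest' = []
          if length ≥ 2 then
            ((if atEnd then (0 : Int) else 1), if st.1 ≠ 0 then st.2 ++ [st.1] else st.2)
          else if ¬ atEnd then (st.1 + 1, st.2) else st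
        else st
      gera_nome_altLoop rest' st'
  termination_by l => l.length
  decreasing_by
    simp only [List.length_cons]
    exact Nat.lt_succ_of_le (List.length_dropWhile_le _ _)

def gera_nome_alt (tab_str : String) : String :=
  let st := gera_nome_altLoop tab_str.toList ((0 : Int), ([] : List Int))
  let seq := if st.1 ≠ 0 then st.2 ++ [st.1] else st.2
  PySem.Str.join "_" (seq.map PySem.Int.toStr)

-- ===== PRECONDITION & SPEC =====
def Spec_gera_nome (tab_str : String) (out : String) : Prop := out = gera_nome_alt tab_str
instance (tab_str : String) (out : String) : Decidable (Spec_gera_nome tab_str out) := by unfold Spec_gera_nome; infer_instance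

-- ===== CLAIM (what is proved, stated in full; the proofs are below) =====
def Claim_equal_gera_nome : Prop := ∀ (tab_str : String), Dom_gera_nome tab_str → Spec_gera_nome tab_str (gera_nome tab_str)

-- ===== LEMMAS AND PROOFS =====

-- A's per-index step, seen as a function of the adjacent pair of characters.
def pvPairStep (st : Int × List Int) (p : Char × Char) : Int × List Int :=
  if p.1 = ' ' ∧ p.2 = ' ' then
    if st.1 ≠ 0 then (0, st.2 ++ [st.1]) else st
  else if p.1 = ' ' then (st.1 + 1, st.2)
  else st

-- the list of adjacent pairs of a list
def pvPairs : List Char → List (Char × Char)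
  | [] => []
  | [_] => []
  | a :: b :: t => (a, b) :: pvPairs (b :: t)

lemma pvPairs_length : ∀ cs : List Char, (pvPairs cs).length = cs.length - 1 := by
  intro cs
  induction cs with
  | nil => rfl
  | cons a t ih =>
    cases t with
    | nil => rfl
    | cons b u => simp [pvPairs] at ih ⊢; omega

lemma pvPairs_getD : ∀ (cs : List Char) (k : Nat), k < (pvPairs cs).length →
    (pvPairs cs).getD k (' ', ' ') = (cs.getD k ' ', cs.getD (k + 1) ' ') := by
  intro cs
  induction cs with
  | nil => intro k h; simp [pvPairs] at h
  | cons a t ih =>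
    intro k h
    cases t with
    | nil => simp [pvPairs] at h
    | cons b u =>
      cases k with
      | zero => simp [pvPairs]
      | succ m =>
        simp only [pvPairs, List.length_cons] at h
        simpa [pvPairs] using ih m (by omega)

lemma pvFoldl_congr_mem {α β : Type} (l : List α) (f g : β → α → β)
    (h : ∀ b a, a ∈ l → f b a = g b a) : ∀ init, l.foldl f init = l.foldl g init := by
  induction l with
  | nil => intro init; rfl
  | cons a t ih =>
    intro init
    simp only [List.foldl_cons]
    rw [h init a (by simp)]
    exact ih (fun b x hx => h b x (by simp [hx])) _

lemma pvRange_foldl_getD {β : Type} (l : List (Char × Char)) (f : β → Char × Char → β) :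
    ∀ init, (List.range l.length).foldl (fun st k => f st (l.getD k (' ', ' '))) init
      = l.foldl f init := by
  induction l with
  | nil => intro init; rfl
  | cons a t ih =>
    intro init
    rw [List.length_cons, List.range_succ_eq_map]
    simp only [List.foldl_cons, List.foldl_map, List.getD_cons_zero, List.getD_cons_succ]
    exact ih (f init a)

-- A's range-fold equals the fold of pvPairStep over the adjacent pairs.
lemma pvA_fold_eq_pairs (cs : List Char) (init : Int × List Int) :
    (List.range (cs.length - 1)).foldl
      (fun (st : Int × List Int) ch =>
        if cs.getD ch ' ' = ' ' ∧ cs.getD (ch + 1) ' ' = ' ' then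
          if st.1 ≠ 0 then (0, st.2 ++ [st.1]) else st
        else if cs.getD ch ' ' = ' ' then (st.1 + 1, st.2)
        else st) init
    = (pvPairs cs).foldl pvPairStep init := by
  rw [← pvPairs_length cs, ← pvRange_foldl_getD (pvPairs cs) pvPairStep init]
  apply pvFoldl_congr_mem
  intro b k hk
  have hk' : k < (pvPairs cs).length := List.mem_range.mp hk
  rw [pvPairs_getD cs k hk']
  rfl

-- the bridge pairs from a run's character into the remainder
def pvBridge (c : Char) : List Char → List (Char × Char)
  | [] => []
  | y :: t => (c, y) :: pvPairs (y :: t)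

lemma pvPairs_replicate_append : ∀ (L : Nat) (c : Char) (r : List Char),
    pvPairs (List.replicate (L + 1) c ++ r)
      = List.replicate L (c, c) ++ pvBridge c r := by
  intro L
  induction L with
  | zero =>
    intro c r
    cases r with
    | nil => rfl
    | cons y t => rfl
  | succ m ih =>
    intro c r
    have h1 : List.replicate (m + 1 + 1) c ++ r = c :: (List.replicate (m + 1) c ++ r) := by
      simp [List.replicate_succ]
    have h2 : List.replicate (m + 1) c ++ r = c :: (List.replicate m c ++ r) := by
      simp [List.replicate_succ]
    rw [h1, h2, show pvPairs (c :: (c :: (List.replicate m c ++ r)))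
        = (c, c) :: pvPairs (c :: (List.replicate m c ++ r)) from rfl, ← h2, ih]
    simp [List.replicate_succ]

lemma pvFold_replicate_space (m : Nat) (s : List Int) :
    List.foldl pvPairStep (0, s) (List.replicate m (' ', ' ')) = (0, s) := by
  induction m with
  | zero => rfl
  | succ k ih => simpa [List.replicate_succ, pvPairStep] using ih

lemma pvFold_replicate_space' (m : Nat) (st : Int × List Int) :
    List.foldl pvPairStep st (List.replicate (m + 1) (' ', ' '))
      = (0, if st.1 ≠ 0 then st.2 ++ [st.1] else st.2) := by
  obtain ⟨a, s⟩ := st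
  rw [List.replicate_succ, List.foldl_cons]
  by_cases h1 : a = 0
  · simp [pvPairStep, h1, pvFold_replicate_space]
  · simp [pvPairStep, h1, pvFold_replicate_space]

lemma pvFold_replicate_nonspace (c : Char) (hc : c ≠ ' ') (m : Nat) :
    ∀ st : Int × List Int, List.foldl pvPairStep st (List.replicate m (c, c)) = st := by
  induction m with
  | zero => intro st; rfl
  | succ k ih => intro st; simpa [List.replicate_succ, pvPairStep, hc] using ih _

lemma pvTakeWhile_eq_replicate (c : Char) (l : List Char) :
    l.takeWhile (· == c) = List.replicate (l.takeWhile (· == c)).length c := by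
  apply List.eq_replicate_of_mem
  intro x hx
  simpa using List.mem_takeWhile_imp hx

lemma pvDropWhile_head_ne (c : Char) (l : List Char) (y : Char) (t : List Char)
    (h : l.dropWhile (· == c) = y :: t) : y ≠ c := by
  have h2 := List.head?_dropWhile_not (· == c) l
  rw [h] at h2
  simp only [List.head?_cons] at h2
  simpa using h2

lemma pvAltLoop_cons (c : Char) (rest : List Char) (st : Int × List Int) :
    gera_nome_altLoop (c :: rest) st =
      gera_nome_altLoop (rest.dropWhile (· == c))
        (if c = ' ' then
          (if (rest.takeWhile (· == c)).length + 1 ≥ 2 then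
            ((if rest.dropWhile (· == c) = [] then (0 : Int) else 1),
             if st.1 ≠ 0 then st.2 ++ [st.1] else st.2)
          else if ¬ (rest.dropWhile (· == c) = []) then (st.1 + 1, st.2) else st)
        else st) := by
  rw [gera_nome_altLoop]

-- the main equivalence: folding the pair step over adjacent pairs = B's run loop
lemma pvMainAux : ∀ (n : Nat) (cs : List Char), cs.length ≤ n → ∀ (st : Int × List Int),
    (pvPairs cs).foldl pvPairStep st = gera_nome_altLoop cs st := by
  intro n
  induction n with
  | zero =>
    intro cs h st
    have : cs = [] := List.length_eq_zero_iff.mp (Nat.le_zero.mp h)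
    subst this; rw [gera_nome_altLoop]; rfl
  | succ n ih =>
    intro cs hlen st
    match cs with
    | [] => rw [gera_nome_altLoop]; rfl
    | c :: rest =>
      have htw := pvTakeWhile_eq_replicate c rest
      have hdecomp : c :: rest
          = List.replicate ((rest.takeWhile (· == c)).length + 1) c ++ rest.dropWhile (· == c) := by
        rw [List.replicate_succ, List.cons_append, ← htw, List.takeWhile_append_dropWhile]
      have hrl : (rest.dropWhile (· == c)).length ≤ n := by
        have h1 := List.length_dropWhile_le (· == c) rest
        simp only [List.length_cons] at hlen
        omega
      rw [pvAltLoop_cons, ← ih _ hrl]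
      conv_lhs => rw [hdecomp]
      rw [pvPairs_replicate_append, List.foldl_append]
      by_cases hc : c = ' '
      · subst hc
        cases hL : (rest.takeWhile (· == ' ')).length with
        | zero =>
          simp only [List.replicate_zero, List.foldl_nil]
          cases hr : rest.dropWhile (· == ' ') with
          | nil => simp [pvBridge, pvPairs]
          | cons y t =>
            have hy : y ≠ ' ' := pvDropWhile_head_ne ' ' rest y t hr
            simp [pvBridge, pvPairStep, hy]
        | succ m =>
          rw [pvFold_replicate_space']
          cases hr : rest.dropWhile (· == ' ') with
          | nil => simp [pvBridge, pvPairs]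
          | cons y t =>
            have hy : y ≠ ' ' := pvDropWhile_head_ne ' ' rest y t hr
            simp [pvBridge, pvPairStep, hy]
      · rw [pvFold_replicate_nonspace c hc _ st]
        have hbr : List.foldl pvPairStep st (pvBridge c (rest.dropWhile (· == c)))
            = (pvPairs (rest.dropWhile (· == c))).foldl pvPairStep st := by
          cases hr : rest.dropWhile (· == c) with
          | nil => rfl
          | cons y t => simp [pvBridge, pvPairStep, hc]
        rw [hbr, if_neg hc]

lemma pvMain (cs : List Char) (st : Int × List Int) :
    (pvPairs cs).foldl pvPairStep st = gera_nome_altLoop cs st :=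
  pvMainAux cs.length cs le_rfl st

-- ===== VERDICT (by name: the statement is the Claim_ definition above) =====
theorem gera_nome_spec : Claim_equal_gera_nome := by
  intro tab_str _
  unfold Spec_gera_nome gera_nome gera_nome_alt
  simp only [pvA_fold_eq_pairs, pvMain]
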